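-- pv_equiv track=rewrite | github.com/9beans/AI_system_project | auto_config_generator.py | generate_sets
-- ===== SOURCE A (Python) =====
-- def generate_sets(pe_size, pe_threshold):
--     """
--     Generate all pairs of factors for the given total size,
--     filtering out pairs where either value is less than the threshold.
--
--     Parameters:
--         pe_size (int): The total size for which factor pairs are generated.
--         pe_threshold (int): The minimum value for both factors to be included in the result.
--
--     Returns:
--         list: A list of tuples (ArrayHeight, ArrayWidth) where both values meet the threshold.
--     """
--     sets = []
--     for i in range(1, pe_size + 1):
--         if pe_size % i == 0:
--             # Calculate the pair (i, pe_size // i)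
--             pair = (i, pe_size // i)
--             # Include the pair only if both values are greater than or equal to the threshold
--             if pair[0] >= pe_threshold and pair[1] >= pe_threshold:
--                 sets.append(pair)
--     return sets
-- ===== SOURCE B (Python) =====
-- def generate_sets(pe_size, pe_threshold):
--     """Factor pairs of pe_size with both factors >= pe_threshold, by first factor ascending.
--
--     Scans divisors only up to sqrt(pe_size) and mirrors each pair, instead of
--     scanning every candidate up to pe_size.
--     """
--     if pe_size < 1:
--         return []
--     small = []
--     large = []
--     d = 1
--     while d * d <= pe_size:
--         if pe_size % d == 0:
--             q = pe_size // d
--             if d >= pe_threshold and q >= pe_threshold: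
--                 small.append((d, q))
--                 if d != q:
--                     large.append((q, d))
--         d += 1
--     large.reverse()
--     return small + large
-- ===== Notes on version B (the rewrite author's own statement) =====
-- stated objective: faster
-- what changed: B enumerates divisors only up to sqrt(pe_size), emitting each pair and its mirror, then concatenates the mirrored half in reverse, instead of testing every i from 1 to pe_size.
import Mathlib
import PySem

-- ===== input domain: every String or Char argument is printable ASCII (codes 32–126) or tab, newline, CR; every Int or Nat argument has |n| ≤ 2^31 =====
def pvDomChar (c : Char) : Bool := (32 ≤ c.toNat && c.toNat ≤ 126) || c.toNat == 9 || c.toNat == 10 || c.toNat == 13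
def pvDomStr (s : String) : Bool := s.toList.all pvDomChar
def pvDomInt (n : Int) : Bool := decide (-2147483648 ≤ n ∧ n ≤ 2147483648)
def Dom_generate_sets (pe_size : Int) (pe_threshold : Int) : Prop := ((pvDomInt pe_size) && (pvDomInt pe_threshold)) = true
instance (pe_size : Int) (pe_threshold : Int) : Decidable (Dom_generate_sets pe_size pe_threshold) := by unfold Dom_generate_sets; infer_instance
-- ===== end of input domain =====

-- B replaces A's O(n) scan of all i ≤ n by an O(sqrt n) scan of divisors d with d*d ≤ n,
-- emitting each factor pair and its mirror; proved to return exactly A's list.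


-- ===== PORT A =====
def generate_sets (pe_size : Int) (pe_threshold : Int) : List (Int × Int) :=
  (PySem.List.pyRange 1 (pe_size + 1) 1).foldl (fun sets i =>
    if PySem.Int.mod pe_size i = 0 then
      let pair : Int × Int := (i, PySem.Int.floordiv pe_size i)
      if pair.1 ≥ pe_threshold ∧ pair.2 ≥ pe_threshold then sets ++ [pair] else sets
    else sets) []

-- ===== PORT B =====
-- the `while d * d <= pe_size` loop of Source B; d only ever takes values ≥ 1
def gsLoop (n t : Int) (d : Nat) (small large : List (Int × Int)) :
    List (Int × Int) × List (Int × Int) :=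
  if h : (d : Int) * d ≤ n then
    if PySem.Int.mod n d = 0 then
      let q : Int := PySem.Int.floordiv n d
      if (d : Int) ≥ t ∧ q ≥ t then
        gsLoop n t (d + 1) (small ++ [((d : Int), q)])
          (if (d : Int) ≠ q then large ++ [(q, (d : Int))] else large)
      else gsLoop n t (d + 1) small large
    else gsLoop n t (d + 1) small large
  else (small, large)
termination_by (n + 1 - d).toNat
decreasing_by
  all_goals
    have hd : (d : Int) ≤ (d : Int) * d := by nlinarith [Int.natCast_nonneg d]
    have : (d : Int) ≤ n := le_trans hd h
    push_cast
    omega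

def generate_sets_alt (pe_size : Int) (pe_threshold : Int) : List (Int × Int) :=
  if pe_size < 1 then []
  else
    let r := gsLoop pe_size pe_threshold 1 [] []
    r.1 ++ r.2.reverse

-- ===== PRECONDITION & SPEC =====
def Spec_generate_sets (pe_size : Int) (pe_threshold : Int) (out : List (Int × Int)) : Prop := out = generate_sets_alt pe_size pe_threshold
instance (pe_size : Int) (pe_threshold : Int) (out : List (Int × Int)) : Decidable (Spec_generate_sets pe_size pe_threshold out) := by unfold Spec_generate_sets; infer_instance

-- ===== CLAIM (what is proved, stated in full; the proofs are below) =====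
def Claim_equal_generate_sets : Prop := ∀ (pe_size : Int) (pe_threshold : Int), Dom_generate_sets pe_size pe_threshold → Spec_generate_sets pe_size pe_threshold (generate_sets pe_size pe_threshold)

-- ===== LEMMAS AND PROOFS =====

-- the filter predicate shared by both characterisations, and the two pair builders
def pQ (n t i : Int) : Bool := decide (PySem.Int.mod n i = 0 ∧ t ≤ i ∧ t ≤ PySem.Int.floordiv n i)
def pQ' (n t i : Int) : Bool := pQ n t i && decide (i ≠ PySem.Int.floordiv n i)

lemma pQ_iff (n t i : Int) (hi : 0 < i) :
    pQ n t i = true ↔ i ∣ n ∧ t ≤ i ∧ t ≤ n / i := by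
  simp [pQ, PySem.Int.mod_eq_zero_iff_dvd, PySem.Int.floordiv_eq_ediv_of_pos hi]

lemma pQ'_iff (n t i : Int) (hi : 0 < i) :
    pQ' n t i = true ↔ (i ∣ n ∧ t ≤ i ∧ t ≤ n / i) ∧ i ≠ n / i := by
  simp [pQ', pQ_iff n t i hi, PySem.Int.floordiv_eq_ediv_of_pos hi]

lemma pvOneLeDiv {n d : Int} (hn : 1 ≤ n) (hd : 1 ≤ d) (h : d ∣ n) : 1 ≤ n / d := by
  have hmul : n / d * d = n := Int.ediv_mul_cancel h
  nlinarith [hmul]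

lemma pvDivDivSelf {n d : Int} (hn : 1 ≤ n) (hd : 1 ≤ d) (h : d ∣ n) : n / (n / d) = d := by
  obtain ⟨k, hk⟩ := h
  subst hk
  rw [Int.mul_ediv_cancel_left _ (by omega : d ≠ 0)]
  have hk1 : 1 ≤ k := by nlinarith
  rw [mul_comm, Int.mul_ediv_cancel_left _ (by omega : k ≠ 0)]

lemma pvDivDvd {n d : Int} (h : d ∣ n) : n / d ∣ n := by
  obtain ⟨k, hk⟩ := h
  subst hk
  rcases eq_or_ne d 0 with rfl | hd
  · simp
  · rw [Int.mul_ediv_cancel_left _ hd]; exact ⟨d, mul_comm d k⟩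

lemma pvDivStrictAnti {n a b : Int} (hn : 1 ≤ n) (ha : 1 ≤ a) (hab : a < b)
    (hA : a ∣ n) (hB : b ∣ n) : n / b < n / a := by
  have h1 : n / a * a = n := Int.ediv_mul_cancel hA
  have h2 : n / b * b = n := Int.ediv_mul_cancel hB
  have hb1 : 1 ≤ n / b := pvOneLeDiv hn (by omega) hB
  nlinarith
lemma pvSqLtDiv {n sq d : Int} (hn : 1 ≤ n) (hle : sq * sq ≤ n) (hd1 : 1 ≤ d)
    (hdsq : d ≤ sq) (hdvd : d ∣ n) (hne : d ≠ n / d) : sq < n / d := by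
  by_contra hc
  push Not at hc
  have h1 : n / d * d = n := Int.ediv_mul_cancel hdvd
  have hq1 : 1 ≤ n / d := pvOneLeDiv hn hd1 hdvd
  have hsq1 : 1 ≤ sq := by omega
  have heq : n / d * d = sq * sq := by nlinarith
  have hdq : d = sq := by nlinarith
  have hqq : n / d = sq := by nlinarith
  exact hne (by omega)

lemma pvDivLeSq {n sq i : Int} (hn : 1 ≤ n) (hsq0 : 0 ≤ sq) (hgt : n < (sq + 1) * (sq + 1))
    (hi1 : 1 ≤ i) (hisq : sq < i) (hdvd : i ∣ n) : n / i ≤ sq := by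
  by_contra hc
  push Not at hc
  have h1 : n / i * i = n := Int.ediv_mul_cancel hdvd
  have key : (sq + 1) * (sq + 1) ≤ n / i * i :=
    mul_le_mul (by omega) (by omega) (by omega) (by omega)
  omega


def fA (n : Int) (i : Int) : Int × Int := (i, PySem.Int.floordiv n i)
def gB (n : Int) (i : Int) : Int × Int := (PySem.Int.floordiv n i, i)

lemma genA_eq (n t : Int) :
    generate_sets n t = ((PySem.List.pyRange 1 (n + 1) 1).filter (pQ n t)).map (fA n) := by
  have hstep : (fun (sets : List (Int × Int)) (i : Int) =>
      if PySem.Int.mod n i = 0 then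
        let pair : Int × Int := (i, PySem.Int.floordiv n i)
        if pair.1 ≥ t ∧ pair.2 ≥ t then sets ++ [pair] else sets
      else sets)
      = (fun sets i => if pQ n t i = true then sets ++ [fA n i] else sets) := by
    funext sets i
    by_cases h1 : PySem.Int.mod n i = 0 <;> by_cases h2 : t ≤ i <;>
      by_cases h3 : t ≤ PySem.Int.floordiv n i <;>
      simp [pQ, fA, h1, h2, h3, ge_iff_le]
  rw [generate_sets, hstep, PySem.List.foldl_append_if]
  simp

lemma gsLoop_spec (n t : Int) (sq : Int)
    (hsq : ∀ d : Int, 0 ≤ d → (d * d ≤ n ↔ d ≤ sq)) :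
    ∀ (d : Nat) (small large : List (Int × Int)),
      gsLoop n t d small large =
        (small ++ ((PySem.List.pyRange d (sq + 1) 1).filter (pQ n t)).map (fA n),
         large ++ ((PySem.List.pyRange d (sq + 1) 1).filter (pQ' n t)).map (gB n)) := by
  intro d small large
  induction d, small, large using gsLoop.induct (n := n) (t := t) with
  | case1 d small large h1 h2 q h3 ih =>
    have hqdef : q = PySem.Int.floordiv n ↑d := rfl
    clear_value q
    subst hqdef
    rw [gsLoop]
    rw [dif_pos h1, if_pos h2, if_pos h3]
    have hlt : (d : Int) < sq + 1 := by
      have := (hsq d (Int.natCast_nonneg d)).mp h1; omega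
    simp only [dite_eq_ite] at ih
    rw [PySem.List.pyRange_one_cons hlt, ih]
    have hq : pQ n t d = true := by
      simp only [pQ, decide_eq_true_eq]; exact ⟨h2, h3.1, h3.2⟩
    by_cases hne : (d : Int) ≠ PySem.Int.floordiv n d
    · have hq' : pQ' n t d = true := by simp [pQ', hq, hne]
      simp [hq, hq', fA, gB, hne]
    · have hq' : pQ' n t d = false := by simp [pQ', hne]
      simp [hq, hq', fA, hne]
  | case2 d small large h1 h2 q h3 ih =>
    have hqdef : q = PySem.Int.floordiv n ↑d := rfl
    clear_value q
    subst hqdef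
    rw [gsLoop]
    rw [dif_pos h1, if_pos h2, if_neg h3]
    have hlt : (d : Int) < sq + 1 := by
      have := (hsq d (Int.natCast_nonneg d)).mp h1; omega
    rw [PySem.List.pyRange_one_cons hlt, ih]
    have hq : pQ n t d = false := by
      simp only [pQ, decide_eq_false_iff_not]
      rintro ⟨-, ha, hb⟩; exact h3 ⟨ha, hb⟩
    have hq' : pQ' n t d = false := by simp [pQ', hq]
    simp [hq, hq']
  | case3 d small large h1 h2 ih =>
    rw [gsLoop]
    rw [dif_pos h1, if_neg h2]
    have hlt : (d : Int) < sq + 1 := by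
      have := (hsq d (Int.natCast_nonneg d)).mp h1; omega
    rw [PySem.List.pyRange_one_cons hlt, ih]
    have hq : pQ n t d = false := by
      simp only [pQ, decide_eq_false_iff_not]
      rintro ⟨h, -⟩; exact h2 h
    have hq' : pQ' n t d = false := by simp [pQ', hq]
    simp [hq, hq']
  | case4 d small large h1 =>
    rw [gsLoop]
    rw [dif_neg h1]
    have hge : sq + 1 ≤ (d : Int) := by
      have := (hsq d (Int.natCast_nonneg d)).not.mp h1; omega
    rw [PySem.List.pyRange_one_eq_nil hge]
    simp

lemma core_split (n t : Int) (hn : 1 ≤ n) (sq : Int) (hsq0 : 0 ≤ sq)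
    (hsq : ∀ d : Int, 0 ≤ d → (d * d ≤ n ↔ d ≤ sq)) :
    (PySem.List.pyRange 1 (n + 1) 1).filter (pQ n t) =
      (PySem.List.pyRange 1 (sq + 1) 1).filter (pQ n t) ++
      (((PySem.List.pyRange 1 (sq + 1) 1).filter (pQ' n t)).reverse).map
        (fun d => PySem.Int.floordiv n d) := by
  have hle : sq * sq ≤ n := (hsq sq hsq0).mpr le_rfl
  have hgt : n < (sq + 1) * (sq + 1) := by
    by_contra hc; push Not at hc
    have := (hsq (sq + 1) (by omega)).mp hc; omega
  -- elements of the filtered lists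
  have memQ : ∀ x ∈ (PySem.List.pyRange 1 (sq + 1) 1).filter (pQ' n t),
      1 ≤ x ∧ x ≤ sq ∧ x ∣ n ∧ t ≤ x ∧ t ≤ n / x ∧ x ≠ n / x := by
    intro x hx
    rw [List.mem_filter, PySem.List.mem_pyRange_one] at hx
    obtain ⟨⟨h1, h2⟩, hp⟩ := hx
    rw [pQ'_iff n t x (by omega)] at hp
    exact ⟨h1, by omega, hp.1.1, hp.1.2.1, hp.1.2.2, hp.2⟩
  -- sortedness of LHS
  have sortL : ((PySem.List.pyRange 1 (n + 1) 1).filter (pQ n t)).Pairwise (· < ·) :=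
    (PySem.List.pairwise_lt_pyRange_one 1 (n + 1)).filter _
  -- sortedness of RHS
  have sortB : ((((PySem.List.pyRange 1 (sq + 1) 1).filter (pQ' n t)).reverse).map
      (fun d => PySem.Int.floordiv n d)).Pairwise (· < ·) := by
    rw [List.pairwise_map, List.pairwise_reverse]
    have base : ((PySem.List.pyRange 1 (sq + 1) 1).filter (pQ' n t)).Pairwise (· < ·) :=
      (PySem.List.pairwise_lt_pyRange_one 1 (sq + 1)).filter _
    refine base.imp_of_mem ?_
    intro a b ha hb hab
    obtain ⟨ha1, -, haD, -⟩ := memQ a ha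
    obtain ⟨hb1, -, hbD, -⟩ := memQ b hb
    have : n / b < n / a := pvDivStrictAnti hn ha1 hab haD hbD
    rw [PySem.Int.floordiv_eq_ediv_of_pos (by omega : (0:Int) < a),
        PySem.Int.floordiv_eq_ediv_of_pos (by omega : (0:Int) < b)]
    exact this
  have sortR : ((PySem.List.pyRange 1 (sq + 1) 1).filter (pQ n t) ++
      (((PySem.List.pyRange 1 (sq + 1) 1).filter (pQ' n t)).reverse).map
        (fun d => PySem.Int.floordiv n d)).Pairwise (· < ·) := by
    rw [List.pairwise_append]
    refine ⟨(PySem.List.pairwise_lt_pyRange_one 1 (sq + 1)).filter _, sortB, ?_⟩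
    intro a ha b hb
    rw [List.mem_filter, PySem.List.mem_pyRange_one] at ha
    rw [List.mem_map] at hb
    obtain ⟨d, hd, rfl⟩ := hb
    rw [List.mem_reverse] at hd
    obtain ⟨hd1, hdsq, hdD, -, -, hdne⟩ := memQ d hd
    have : sq < n / d := pvSqLtDiv hn hle hd1 hdsq hdD hdne
    rw [PySem.Int.floordiv_eq_ediv_of_pos (by omega : (0:Int) < d)]
    omega
  -- membership
  have memiff : ∀ x, x ∈ (PySem.List.pyRange 1 (n + 1) 1).filter (pQ n t) ↔
      x ∈ (PySem.List.pyRange 1 (sq + 1) 1).filter (pQ n t) ++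
        (((PySem.List.pyRange 1 (sq + 1) 1).filter (pQ' n t)).reverse).map
          (fun d => PySem.Int.floordiv n d) := by
    intro x
    rw [List.mem_append, List.mem_filter, List.mem_filter, List.mem_map,
        PySem.List.mem_pyRange_one, PySem.List.mem_pyRange_one]
    constructor
    · rintro ⟨⟨hx1, hx2⟩, hp⟩
      rw [pQ_iff n t x (by omega)] at hp
      obtain ⟨hD, ht1, ht2⟩ := hp
      by_cases hxs : x ≤ sq
      · exact Or.inl ⟨⟨hx1, by omega⟩, (pQ_iff n t x (by omega)).mpr ⟨hD, ht1, ht2⟩⟩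
      · push Not at hxs
        have hq1 : 1 ≤ n / x := pvOneLeDiv hn (by omega) hD
        have hqs : n / x ≤ sq := pvDivLeSq hn hsq0 hgt (by omega) hxs hD
        have hback : n / (n / x) = x := pvDivDivSelf hn (by omega) hD
        refine Or.inr ⟨n / x, ?_, ?_⟩
        · rw [List.mem_reverse, List.mem_filter, PySem.List.mem_pyRange_one]
          refine ⟨⟨hq1, by omega⟩, (pQ'_iff n t _ (by omega)).mpr ⟨⟨pvDivDvd hD, ht2, ?_⟩, ?_⟩⟩
          · rw [hback]; exact ht1
          · rw [hback]; omega
        · rw [PySem.Int.floordiv_eq_ediv_of_pos (by omega : (0:Int) < n / x)]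
          exact hback
    · rintro (⟨⟨hx1, hx2⟩, hp⟩ | ⟨d, hd, rfl⟩)
      · rw [pQ_iff n t x (by omega)] at hp
        have hxn : x ≤ n := Int.le_of_dvd (by omega) hp.1
        exact ⟨⟨hx1, by omega⟩, (pQ_iff n t x (by omega)).mpr hp⟩
      · rw [List.mem_reverse] at hd
        obtain ⟨hd1, hdsq, hdD, hdt1, hdt2, hdne⟩ := memQ d hd
        have hq1 : 1 ≤ n / d := pvOneLeDiv hn hd1 hdD
        have hqD : n / d ∣ n := pvDivDvd hdD
        have hqn : n / d ≤ n := Int.le_of_dvd (by omega) hqD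
        have hback : n / (n / d) = d := pvDivDivSelf hn hd1 hdD
        rw [PySem.Int.floordiv_eq_ediv_of_pos (by omega : (0:Int) < d)]
        refine ⟨⟨hq1, by omega⟩, (pQ_iff n t _ (by omega)).mpr ⟨hqD, hdt2, ?_⟩⟩
        rw [hback]; exact hdt1
  -- nodup + perm + sorted ⇒ equal
  have ndL := sortL.imp (fun h => ne_of_lt h)
  have ndR := sortR.imp (fun h => ne_of_lt h)
  have hperm := (List.perm_ext_iff_of_nodup ndL ndR).mpr memiff
  exact List.eq_of_perm_of_sorted (fun a b _ _ h h' => absurd h' (lt_asymm h)) sortL sortR hperm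

lemma sqrt_char (n : Int) (hn : 1 ≤ n) :
    ∀ d : Int, 0 ≤ d → (d * d ≤ n ↔ d ≤ ((Nat.sqrt n.toNat : Nat) : Int)) := by
  intro d hd
  obtain ⟨m, rfl⟩ := Int.eq_ofNat_of_zero_le hd
  rw [show ((m : Int) * m) = ((m * m : Nat) : Int) by push_cast; ring]
  constructor
  · intro h
    have : m * m ≤ n.toNat := by omega
    exact_mod_cast Nat.le_sqrt.mpr this
  · intro h
    have hm : m ≤ Nat.sqrt n.toNat := by exact_mod_cast h
    have := Nat.le_sqrt.mp hm
    omega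

-- ===== VERDICT (by name: the statement is the Claim_ definition above) =====
theorem generate_sets_spec : Claim_equal_generate_sets := by
  intro n t _
  unfold Spec_generate_sets
  by_cases hn : n < 1
  · rw [genA_eq, generate_sets_alt, if_pos hn,
        PySem.List.pyRange_one_eq_nil (by omega : n + 1 ≤ 1)]
    simp
  · push Not at hn
    have hsq := sqrt_char n hn
    have hsq0 : (0 : Int) ≤ ((Nat.sqrt n.toNat : Nat) : Int) := Int.natCast_nonneg _
    rw [genA_eq, generate_sets_alt, if_neg (by omega)]
    rw [gsLoop_spec n t _ hsq 1 [] []]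
    simp only [List.nil_append, Nat.cast_one]
    rw [core_split n t hn _ hsq0 hsq, List.map_append]
    congr 1
    rw [List.map_map, ← List.map_reverse]
    refine List.map_congr_left ?_
    intro d hd
    rw [List.mem_reverse, List.mem_filter, PySem.List.mem_pyRange_one] at hd
    obtain ⟨⟨hd1, hd2⟩, hp⟩ := hd
    rw [pQ'_iff n t d (by omega)] at hp
    have hback : n / (n / d) = d := pvDivDivSelf hn (by omega) hp.1.1
    have hq1 : 1 ≤ n / d := pvOneLeDiv hn (by omega) hp.1.1
    simp only [Function.comp_apply, fA, gB]
    rw [PySem.Int.floordiv_eq_ediv_of_pos (by omega : (0:Int) < d),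
        PySem.Int.floordiv_eq_ediv_of_pos (by omega : (0:Int) < n / d), hback]
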